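-- pv_equiv track=rewrite | github.com/raeez/chiral-bar-cobar | compute/lib/galois_cross_channel_engine.py | galois_complexity_growth
-- ===== SOURCE A (Python) =====
-- from math import comb, factorial, gcd
--
-- def spectral_curve_genus(N):
--     r"""Genus of the W_N spectral curve y^N + u_2 y^{N-2} + ... + u_N = 0.
--
--     The spectral curve is a degree-N cover of P^1. By Riemann-Hurwitz,
--     the genus depends on the ramification.
--
--     For the GENERIC spectral curve (all u_j nonzero, simple ramification):
--         g = (N-1)(N-2)/2
--
--     This matches:
--         W_2: g = 0 (rational)
--         W_3: g = 1 (elliptic)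
--         W_4: g = 3 (hyperelliptic for N=4)
--         W_5: g = 6
--
--     The generic spectral curve genus controls the TRANSCENDENCE DEGREE
--     of the period matrix, which in turn controls the arithmetic complexity
--     of the genus-expansion.
--     """
--     return (N - 1) * (N - 2) // 2
--
-- def _count_higher_spin_couplings(N):
--     """Count parity-allowed non-gravitational trivalent couplings for W_N.
--
--     A triple (W_i, W_j, W_k) with i, j, k in {2, 3, ..., N} is:
--     - Parity-allowed if the number of odd-weight generators is even.
--     - Non-gravitational if it is NOT of the form (T, W_j, W_j).
--
--     We count unordered triples, excluding pure gravitational ones.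
--     """
--     weights = list(range(2, N + 1))
--     count = 0
--     seen = set()
--     for i in weights:
--         for j in weights:
--             if j < i:
--                 continue
--             for k in weights:
--                 if k < j:
--                     continue
--                 triple = (i, j, k)
--                 if triple in seen:
--                     continue
--                 seen.add(triple)
--                 # Parity check
--                 n_odd = sum(1 for w in triple if w % 2 == 1)
--                 if n_odd % 2 != 0:
--                     continue
--                 # Exclude gravitational (2, j, j)
--                 if triple[0] == 2 and triple[1] == triple[2]:
--                     continue
--                 # Exclude (2, 2, 2) which is gravitational
--                 if triple == (2, 2, 2):
--                     continue
--                 count += 1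
--     return count
--
-- def galois_complexity_growth(N_max=8):
--     r"""Estimate the growth of Galois complexity with N.
--
--     The number of independent parity-allowed higher-spin couplings r(N)
--     bounds the F_2-rank of the Galois group from above:
--         |Gal(K_N/Q(c))| <= 2^{r(N)}
--
--     For fixed N, the number of parity-allowed triples (i, j, k) with
--     2 <= i <= j <= k <= N and even number of odd weights, excluding
--     gravitational triples, grows roughly as N^3/6.
--
--     The ACTUAL Galois group is smaller due to shared discriminant factors.
--     """
--     result = []
--     for N in range(2, N_max + 1):
--         r = _count_higher_spin_couplings(N)
--         result.append({
--             'N': N,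
--             'n_hs_couplings': r,
--             'galois_upper_bound': 2**r,
--             'weyl_order': factorial(N),
--             'spectral_genus': spectral_curve_genus(N),
--         })
--     return result
-- ===== SOURCE B (Python) =====
-- def galois_complexity_growth(N_max=8):
--     # One incremental pass: r(N) is updated by a closed-form per-N increment
--     # computed from running even/odd weight counts, instead of re-running
--     # A's O(N^3) triple enumeration for every N.
--     result = []
--     evens, odds = 1, 0          # even/odd weights in {2..N}, starting at N = 2
--     tri_e, tri_o = 1, 0         # triangular numbers evens*(evens+1)//2, odds*(odds+1)//2
--     r, bound, fact = 0, 1, 2    # couplings, 2**r, N!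
--     for N in range(2, N_max + 1):
--         result.append({
--             'N': N,
--             'n_hs_couplings': r,
--             'galois_upper_bound': bound,
--             'weyl_order': fact,
--             'spectral_genus': (N - 1) * (N - 2) // 2,
--         })
--         M = N + 1
--         if M % 2 == 0:
--             evens += 1
--             tri_e += evens
--             g = tri_e + tri_o - 1
--         else:
--             odds += 1
--             tri_o += odds
--             g = evens * odds - 1
--         r += g
--         bound <<= g
--         fact *= M
--     return result
-- ===== Notes on version B (the rewrite author's own statement) =====
-- stated objective: faster
-- what changed: A re-enumerates all O(N^3) weight triples (with a redundant seen-set) for every N up to N_max; B makes a single incremental pass that updates the coupling count r by a closed-form per-N increment computed from running even/odd weight counts and their triangular numbers, and maintains 2**r and N! incrementally.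
import Mathlib
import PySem

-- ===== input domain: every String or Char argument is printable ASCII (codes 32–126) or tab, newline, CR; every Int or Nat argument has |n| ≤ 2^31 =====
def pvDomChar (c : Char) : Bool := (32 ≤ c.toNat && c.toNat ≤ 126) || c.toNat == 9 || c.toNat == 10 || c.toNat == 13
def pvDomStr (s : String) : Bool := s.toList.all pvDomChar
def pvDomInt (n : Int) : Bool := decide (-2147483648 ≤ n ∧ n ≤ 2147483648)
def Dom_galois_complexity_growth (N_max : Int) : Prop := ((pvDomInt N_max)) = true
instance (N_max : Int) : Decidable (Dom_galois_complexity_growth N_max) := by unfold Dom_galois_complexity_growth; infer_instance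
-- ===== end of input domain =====

-- B replaces A's per-N O(N^3) triple enumeration by a single incremental pass whose per-N
-- increment is a closed form in running even/odd weight counts (objective: faster).

-- ===== PORT A =====

def spectral_curve_genus (N : Int) : Int := PySem.Int.floordiv ((N - 1) * (N - 2)) 2

-- A's innermost 'for k in weights' loop; state = (count, seen)
def hsK (ks : List Int) (i j : Int) (st : Int × PySem.Set (Int × Int × Int)) :
    Int × PySem.Set (Int × Int × Int) :=
  ks.foldl (fun st k =>
    if k < j then st
    else
      let triple := (i, j, k)
      if PySem.Set.contains st.2 triple then st
      else
        let seen := PySem.Set.add st.2 triple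
        let n_odd : Int := ([i, j, k].countP (fun w => PySem.Int.mod w 2 == 1) : Nat)
        if PySem.Int.mod n_odd 2 ≠ 0 then (st.1, seen)
        else if i = 2 ∧ j = k then (st.1, seen)
        else if (i, j, k) = ((2 : Int), (2 : Int), (2 : Int)) then (st.1, seen)
        else (st.1 + 1, seen)) st

-- A's middle 'for j in weights' loop ('if j < i: continue')
def hsJ (ws js : List Int) (i : Int) (st : Int × PySem.Set (Int × Int × Int)) :
    Int × PySem.Set (Int × Int × Int) :=
  js.foldl (fun st j => if j < i then st else hsK ws i j st) st

-- _count_higher_spin_couplings(N)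
def count_higher_spin_couplings (N : Int) : Int :=
  let weights := PySem.List.pyRange 2 (N + 1) 1
  (weights.foldl (fun st i => hsJ weights weights i st) ((0 : Int), PySem.Set.empty)).1

-- galois_complexity_growth(N_max); 2**r has r ≥ 0 (a count), so it is 2 ^ r.toNat
def galois_complexity_growth (N_max : Int) : List (List (String × Int)) :=
  (PySem.List.pyRange 2 (N_max + 1) 1).foldl (fun result N =>
    let r := count_higher_spin_couplings N
    result ++ [[("N", N), ("n_hs_couplings", r), ("galois_upper_bound", (2 : Int) ^ r.toNat),
                ("weyl_order", (N.toNat.factorial : Int)),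
                ("spectral_genus", spectral_curve_genus N)]]) []

-- ===== PORT B =====

-- counter update at the end of B's loop body (counters: evens, odds, tri_e, tri_o, r, bound, fact)
def galois_upd (N : Int) (c : Int × Int × Int × Int × Int × Int × Int) :
    Int × Int × Int × Int × Int × Int × Int :=
  let (evens, odds, tri_e, tri_o, r, bound, fact) := c
  let M := N + 1
  if PySem.Int.mod M 2 == 0 then
    let evens := evens + 1
    let tri_e := tri_e + evens
    let g := tri_e + tri_o - 1
    (evens, odds, tri_e, tri_o, r + g, bound <<< g.toNat, fact * M)
  else
    let odds := odds + 1
    let tri_o := tri_o + odds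
    let g := evens * odds - 1
    (evens, odds, tri_e, tri_o, r + g, bound <<< g.toNat, fact * M)

-- B's loop body: emit the row for N from the current counters, then update them
def galois_step (st : List (List (String × Int)) × Int × Int × Int × Int × Int × Int × Int)
    (N : Int) : List (List (String × Int)) × Int × Int × Int × Int × Int × Int × Int :=
  let (result, c) := st
  let (_, _, _, _, r, bound, fact) := c
  (result ++ [[("N", N), ("n_hs_couplings", r), ("galois_upper_bound", bound),
               ("weyl_order", fact),
               ("spectral_genus", PySem.Int.floordiv ((N - 1) * (N - 2)) 2)]],
   galois_upd N c)

def galois_complexity_growth_alt (N_max : Int) : List (List (String × Int)) :=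
  ((PySem.List.pyRange 2 (N_max + 1) 1).foldl galois_step ([], 1, 0, 1, 0, 0, 1, 2)).1

-- ===== PRECONDITION & SPEC =====
def Spec_galois_complexity_growth (N_max : Int) (out : List (List (String × Int))) : Prop := out = galois_complexity_growth_alt N_max
instance (N_max : Int) (out : List (List (String × Int))) : Decidable (Spec_galois_complexity_growth N_max out) := by unfold Spec_galois_complexity_growth; infer_instance

-- ===== CLAIM (what is proved, stated in full; the proofs are below) =====
def Claim_equal_galois_complexity_growth : Prop := ∀ (N_max : Int), Dom_galois_complexity_growth N_max → Spec_galois_complexity_growth N_max (galois_complexity_growth N_max)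

-- ===== LEMMAS AND PROOFS =====

-- the weights list range(2, M+1)
def RW (M : Int) : List Int := PySem.List.pyRange 2 (M + 1) 1

-- the test A applies to a candidate triple (i, j, k)
def indT (i j k : Int) : Bool :=
  (PySem.Int.mod ((([i, j, k].countP (fun w => PySem.Int.mod w 2 == 1)) : Nat) : Int) 2 == 0)
  && !(decide (i = 2 ∧ j = k)) && !(decide ((i, j, k) = ((2 : Int), (2 : Int), (2 : Int))))

-- what A's triple loop counts, as a pure nested sum
def cnt3 (N : Int) : Int :=
  ((RW N).map (fun i =>
    ((RW N).map (fun j =>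
      if j < i then (0 : Int)
      else (((RW N).countP (fun k => !(decide (k < j)) && indT i j k) : Nat) : Int))).sum)).sum

-- parity-allowed pairs i ≤ j in RW M paired with k = M
def pairSum (M i : Int) : Int :=
  ((RW M).map (fun j => if j < i then (0 : Int)
    else if (i + j + M) % 2 = 0 then 1 else 0)).sum

def PP (M : Int) : Int := ((RW M).map (fun i => pairSum M i)).sum

-- the new triples counted when the weight range grows to M (the k = M slice, full test)
def newc (M : Int) : Int :=
  ((RW M).map (fun i =>
    ((RW M).map (fun j => if j < i then (0 : Int) else if indT i j M then 1 else 0)).sum)).sum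

-- B's counters at N = n + 2, and the closed forms they maintain
def specState : Nat → Int × Int × Int × Int × Int × Int × Int
  | 0 => (1, 0, 1, 0, 0, 1, 2)
  | n + 1 => galois_upd ((n : Int) + 2) (specState n)

def Ev (n : Nat) : Int := ((n : Int) + 2) / 2
def Od (n : Nat) : Int := ((n : Int) + 1) / 2
def Te : Nat → Int
  | 0 => 1
  | n + 1 => if ((n : Int) + 3) % 2 = 0 then Te n + Ev (n + 1) else Te n
def To : Nat → Int
  | 0 => 0
  | n + 1 => if ((n : Int) + 3) % 2 = 0 then To n else To n + Od (n + 1)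

lemma Te_pos (n : Nat) : 1 ≤ Te n := by
  induction n with
  | zero => norm_num [Te]
  | succ n ih =>
    have : (0 : Int) ≤ Ev (n + 1) := by unfold Ev; omega
    unfold Te; split <;> omega

lemma To_nonneg (n : Nat) : 0 ≤ To n := by
  induction n with
  | zero => norm_num [To]
  | succ n ih =>
    have : (0 : Int) ≤ Od (n + 1) := by unfold Od; omega
    unfold To; split <;> omega

lemma indT_true_iff (i j k : Int) : indT i j k = true ↔
    (PySem.Int.mod ((([i, j, k].countP (fun w => PySem.Int.mod w 2 == 1)) : Nat) : Int) 2 = 0)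
    ∧ ¬(i = 2 ∧ j = k) ∧ ¬((i, j, k) = ((2 : Int), (2 : Int), (2 : Int))) := by
  unfold indT
  simp only [Bool.and_eq_true, beq_iff_eq, Bool.not_eq_true', decide_eq_false_iff_not]
  tauto

-- ---- seen-set elimination: A's stateful loops compute a pure count ----

lemma hsK_spec (ks : List Int) (i j : Int) (c : Int) (s : PySem.Set (Int × Int × Int))
    (hs : ks.Pairwise (· < ·))
    (hinv : ∀ t ∈ s, t.1 < i ∨ (t.1 = i ∧ t.2.1 < j) ∨
      (t.1 = i ∧ t.2.1 = j ∧ ∀ x ∈ ks, t.2.2 < x)) :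
    (hsK ks i j (c, s)).1 = c + ((ks.countP (fun k => !(decide (k < j)) && indT i j k) : Nat) : Int) ∧
    ∀ t ∈ (hsK ks i j (c, s)).2, t.1 < i ∨ (t.1 = i ∧ t.2.1 ≤ j) := by
  induction ks generalizing c s with
  | nil =>
    refine ⟨by simp [hsK], ?_⟩
    intro t ht
    simp only [hsK, List.foldl_nil] at ht
    rcases hinv t ht with h | h | h
    · exact Or.inl h
    · exact Or.inr ⟨h.1, le_of_lt h.2⟩
    · exact Or.inr ⟨h.1, le_of_eq h.2.1⟩
  | cons k ks ih =>
    rw [List.pairwise_cons] at hs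
    obtain ⟨hk, hs'⟩ := hs
    by_cases hkj : k < j
    · have hpred : (!(decide (k < j)) && indT i j k) = false := by simp [hkj]
      have hinv' : ∀ t ∈ s, t.1 < i ∨ (t.1 = i ∧ t.2.1 < j) ∨
          (t.1 = i ∧ t.2.1 = j ∧ ∀ x ∈ ks, t.2.2 < x) := by
        intro t ht
        rcases hinv t ht with h | h | h
        · exact Or.inl h
        · exact Or.inr (Or.inl h)
        · exact Or.inr (Or.inr ⟨h.1, h.2.1, fun x hx => h.2.2 x (List.mem_cons_of_mem _ hx)⟩)
      have hred : hsK (k :: ks) i j (c, s) = hsK ks i j (c, s) := by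
        simp only [hsK, List.foldl_cons, if_pos hkj]
      rw [hred, List.countP_cons, hpred]
      obtain ⟨h1, h2⟩ := ih c s hs' hinv'
      exact ⟨by rw [h1]; push_cast; ring, h2⟩
    · have hnotin : (i, j, k) ∉ s := by
        intro hmem
        rcases hinv _ hmem with h | h | h
        · exact absurd h (lt_irrefl i)
        · exact absurd h.2 (lt_irrefl j)
        · exact absurd (h.2.2 k List.mem_cons_self) (lt_irrefl k)
      have hcont : PySem.Set.contains s (i, j, k) = false := by
        simp [hnotin]
      have hinv' : ∀ t ∈ PySem.Set.add s (i, j, k), t.1 < i ∨ (t.1 = i ∧ t.2.1 < j) ∨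
          (t.1 = i ∧ t.2.1 = j ∧ ∀ x ∈ ks, t.2.2 < x) := by
        intro t ht
        rcases (PySem.Set.mem_add s (i, j, k) t).mp ht with ht' | rfl
        · rcases hinv t ht' with h | h | h
          · exact Or.inl h
          · exact Or.inr (Or.inl h)
          · exact Or.inr (Or.inr ⟨h.1, h.2.1, fun x hx => h.2.2 x (List.mem_cons_of_mem _ hx)⟩)
        · exact Or.inr (Or.inr ⟨rfl, rfl, fun x hx => hk x hx⟩)
      by_cases hpar : PySem.Int.mod ((([i, j, k].countP (fun w => PySem.Int.mod w 2 == 1)) : Nat) : Int) 2 = 0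
      · by_cases hgrav : i = 2 ∧ j = k
        · have hI : indT i j k = false := by
            rw [Bool.eq_false_iff]
            intro h
            exact ((indT_true_iff i j k).mp h).2.1 hgrav
          have hpred : (!(decide (k < j)) && indT i j k) = false := by
            rw [hI, Bool.and_false]
          have hred : hsK (k :: ks) i j (c, s) = hsK ks i j (c, PySem.Set.add s (i, j, k)) := by
            simp only [hsK, List.foldl_cons, if_neg hkj, hcont, Bool.false_eq_true, if_false,
              if_neg (not_not_intro hpar), if_pos hgrav]
          rw [hred, List.countP_cons, hpred]
          obtain ⟨h1, h2⟩ := ih c _ hs' hinv'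
          exact ⟨by rw [h1]; push_cast; ring, h2⟩
        · by_cases h222 : (i, j, k) = ((2 : Int), (2 : Int), (2 : Int))
          · have hI : indT i j k = false := by
              rw [Bool.eq_false_iff]
              intro h
              exact ((indT_true_iff i j k).mp h).2.2 h222
            have hpred : (!(decide (k < j)) && indT i j k) = false := by
              rw [hI, Bool.and_false]
            have hred : hsK (k :: ks) i j (c, s) = hsK ks i j (c, PySem.Set.add s (i, j, k)) := by
              simp only [hsK, List.foldl_cons, if_neg hkj, hcont, Bool.false_eq_true, if_false,
                if_neg (not_not_intro hpar), if_neg hgrav, if_pos h222]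
            rw [hred, List.countP_cons, hpred]
            obtain ⟨h1, h2⟩ := ih c _ hs' hinv'
            exact ⟨by rw [h1]; push_cast; ring, h2⟩
          · have hI : indT i j k = true := (indT_true_iff i j k).mpr ⟨hpar, hgrav, h222⟩
            have hpred : (!(decide (k < j)) && indT i j k) = true := by
              rw [hI, Bool.and_true]
              simp [hkj]
            have hred : hsK (k :: ks) i j (c, s) = hsK ks i j (c + 1, PySem.Set.add s (i, j, k)) := by
              simp only [hsK, List.foldl_cons, if_neg hkj, hcont, Bool.false_eq_true, if_false,
                if_neg (not_not_intro hpar), if_neg hgrav, if_neg h222]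
            rw [hred, List.countP_cons, hpred]
            obtain ⟨h1, h2⟩ := ih (c + 1) _ hs' hinv'
            exact ⟨by rw [h1]; push_cast; norm_num; ring, h2⟩
      · have hI : indT i j k = false := by
          rw [Bool.eq_false_iff]
          intro h
          exact hpar ((indT_true_iff i j k).mp h).1
        have hpred : (!(decide (k < j)) && indT i j k) = false := by
          rw [hI, Bool.and_false]
        have hred : hsK (k :: ks) i j (c, s) = hsK ks i j (c, PySem.Set.add s (i, j, k)) := by
          simp only [hsK, List.foldl_cons, if_neg hkj, hcont, Bool.false_eq_true, if_false,
            if_pos hpar]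
        rw [hred, List.countP_cons, hpred]
        obtain ⟨h1, h2⟩ := ih c _ hs' hinv'
        exact ⟨by rw [h1]; push_cast; ring, h2⟩

lemma hsJ_spec (ws js : List Int) (i : Int) (c : Int) (s : PySem.Set (Int × Int × Int))
    (hws : ws.Pairwise (· < ·)) (hjs : js.Pairwise (· < ·))
    (hinv : ∀ t ∈ s, t.1 < i ∨ (t.1 = i ∧ ∀ x ∈ js, t.2.1 < x)) :
    (hsJ ws js i (c, s)).1 = c + ((js.map (fun j => if j < i then (0 : Int)
      else ((ws.countP (fun k => !(decide (k < j)) && indT i j k) : Nat) : Int))).sum) ∧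
    ∀ t ∈ (hsJ ws js i (c, s)).2, t.1 ≤ i := by
  induction js generalizing c s with
  | nil =>
    refine ⟨by simp [hsJ], ?_⟩
    intro t ht
    simp only [hsJ, List.foldl_nil] at ht
    rcases hinv t ht with h | h
    · exact le_of_lt h
    · exact le_of_eq h.1
  | cons j js ih =>
    rw [List.pairwise_cons] at hjs
    obtain ⟨hj, hjs'⟩ := hjs
    by_cases hji : j < i
    · have hred : hsJ ws (j :: js) i (c, s) = hsJ ws js i (c, s) := by
        simp only [hsJ, List.foldl_cons, if_pos hji]
      have hinv' : ∀ t ∈ s, t.1 < i ∨ (t.1 = i ∧ ∀ x ∈ js, t.2.1 < x) := by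
        intro t ht
        rcases hinv t ht with h | h
        · exact Or.inl h
        · exact Or.inr ⟨h.1, fun x hx => h.2 x (List.mem_cons_of_mem _ hx)⟩
      rw [hred, List.map_cons, List.sum_cons, if_pos hji]
      obtain ⟨h1, h2⟩ := ih c s hjs' hinv'
      exact ⟨by rw [h1]; ring, h2⟩
    · have hinvK : ∀ t ∈ s, t.1 < i ∨ (t.1 = i ∧ t.2.1 < j) ∨
          (t.1 = i ∧ t.2.1 = j ∧ ∀ x ∈ ws, t.2.2 < x) := by
        intro t ht
        rcases hinv t ht with h | h
        · exact Or.inl h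
        · exact Or.inr (Or.inl ⟨h.1, h.2 j List.mem_cons_self⟩)
      obtain ⟨hk1, hk2⟩ := hsK_spec ws i j c s hws hinvK
      rcases hx : hsK ws i j (c, s) with ⟨c', s'⟩
      simp only [hx] at hk1 hk2
      have hinv' : ∀ t ∈ s', t.1 < i ∨ (t.1 = i ∧ ∀ x ∈ js, t.2.1 < x) := by
        intro t ht
        rcases hk2 t ht with h | h
        · exact Or.inl h
        · exact Or.inr ⟨h.1, fun x hx' => lt_of_le_of_lt h.2 (hj x hx')⟩
      have hred : hsJ ws (j :: js) i (c, s) = hsJ ws js i (c', s') := by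
        simp only [hsJ, List.foldl_cons, if_neg hji, hx]
      rw [hred, List.map_cons, List.sum_cons, if_neg hji]
      obtain ⟨h1, h2⟩ := ih c' s' hjs' hinv'
      refine ⟨by rw [h1, hk1]; ring, h2⟩

lemma hsI_spec (ws is : List Int) (c : Int) (s : PySem.Set (Int × Int × Int))
    (hws : ws.Pairwise (· < ·)) (his : is.Pairwise (· < ·))
    (hinv : ∀ t ∈ s, ∀ x ∈ is, t.1 < x) :
    (is.foldl (fun st i => hsJ ws ws i st) (c, s)).1 =
      c + ((is.map (fun i => ((ws.map (fun j => if j < i then (0 : Int)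
        else ((ws.countP (fun k => !(decide (k < j)) && indT i j k) : Nat) : Int))).sum))).sum) := by
  induction is generalizing c s with
  | nil => simp
  | cons i is ih =>
    rw [List.pairwise_cons] at his
    obtain ⟨hi, his'⟩ := his
    have hinvJ : ∀ t ∈ s, t.1 < i ∨ (t.1 = i ∧ ∀ x ∈ ws, t.2.1 < x) := by
      intro t ht
      exact Or.inl (hinv t ht i List.mem_cons_self)
    obtain ⟨hk1, hk2⟩ := hsJ_spec ws ws i c s hws hws hinvJ
    rcases hx : hsJ ws ws i (c, s) with ⟨c', s'⟩
    simp only [hx] at hk1 hk2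
    have hinv' : ∀ t ∈ s', ∀ x ∈ is, t.1 < x := by
      intro t ht x hx'
      exact lt_of_le_of_lt (hk2 t ht) (hi x hx')
    simp only [List.foldl_cons, hx, List.map_cons, List.sum_cons]
    rw [ih c' s' his' hinv', hk1]
    ring

lemma count_eq_cnt3 (N : Int) : count_higher_spin_couplings N = cnt3 N := by
  have h := hsI_spec (PySem.List.pyRange 2 (N + 1) 1) (PySem.List.pyRange 2 (N + 1) 1) 0
      PySem.Set.empty (PySem.List.pairwise_lt_pyRange_one 2 (N + 1))
      (PySem.List.pairwise_lt_pyRange_one 2 (N + 1))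
      (by intro t ht; exact absurd ht List.not_mem_nil)
  unfold count_higher_spin_couplings cnt3 RW
  rw [h]
  ring

-- ---- the counting mathematics ----

lemma parity_eq (i j k : Int) :
    (PySem.Int.mod ((([i, j, k].countP (fun w => PySem.Int.mod w 2 == 1)) : Nat) : Int) 2 == 0)
      = decide ((i + j + k) % 2 = 0) := by
  rw [Bool.eq_iff_iff]
  simp only [PySem.Int.mod_eq_emod_of_pos (by norm_num : (0 : Int) < 2), List.countP_cons,
    List.countP_nil, beq_iff_eq, decide_eq_true_eq]
  rcases Int.emod_two_eq i with hi | hi <;> rcases Int.emod_two_eq j with hj | hj <;>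
    rcases Int.emod_two_eq k with hk | hk <;> simp [hi, hj, hk] <;> omega

lemma indT_eq (M : Int) (hM : 3 ≤ M) (i j : Int) :
    indT i j M = (decide ((i + j + M) % 2 = 0) && !(decide (i = 2 ∧ j = M))) := by
  unfold indT
  rw [parity_eq]
  have h222 : ¬((i, j, M) = ((2 : Int), (2 : Int), (2 : Int))) := by
    simp only [Prod.mk.injEq, not_and]
    intro _ _; omega
  simp [h222]

lemma RW_succ (M : Int) (hM : 2 ≤ M) : RW M = RW (M - 1) ++ [M] := by
  unfold RW
  rw [show M - 1 + 1 = M by ring, PySem.List.pyRange_one_succ_right (show (2 : Int) ≤ M by omega)]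

lemma mem_RW {x M : Int} (h : x ∈ RW M) : 2 ≤ x ∧ x ≤ M := by
  unfold RW at h
  rw [PySem.List.mem_pyRange_one] at h
  omega

-- split of A's inner double sum when the weight list grows by one element
lemma L1 (M i : Int) (hM : 2 ≤ M) :
    ((RW M).map (fun j => if j < i then (0 : Int)
        else (((RW M).countP (fun k => !(decide (k < j)) && indT i j k) : Nat) : Int))).sum
    = ((RW (M - 1)).map (fun j => if j < i then (0 : Int)
        else (((RW (M - 1)).countP (fun k => !(decide (k < j)) && indT i j k) : Nat) : Int))).sum
      + ((RW (M - 1)).map (fun j => if j < i then (0 : Int) else if indT i j M then 1 else 0)).sum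
      + (if M < i then (0 : Int) else if indT i M M then 1 else 0) := by
  rw [RW_succ M hM, List.map_append, List.sum_append]
  simp only [List.map_cons, List.map_nil, List.sum_cons, List.sum_nil, add_zero]
  have hcong : ∀ j ∈ RW (M - 1),
      (if j < i then (0 : Int)
        else (((RW (M - 1) ++ [M]).countP (fun k => !(decide (k < j)) && indT i j k) : Nat) : Int))
      = (if j < i then (0 : Int)
          else (((RW (M - 1)).countP (fun k => !(decide (k < j)) && indT i j k) : Nat) : Int))
        + (if j < i then (0 : Int) else if indT i j M then 1 else 0) := by
    intro j hj
    obtain ⟨hj2, hjM⟩ := mem_RW hj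
    by_cases hji : j < i
    · simp [hji]
    · rw [if_neg hji, if_neg hji, if_neg hji, List.countP_append]
      have hMj : (!(decide (M < j)) && indT i j M) = indT i j M := by
        simp [show ¬(M < j) by omega]
      simp only [List.countP_cons, List.countP_nil, Nat.zero_add, hMj]
      by_cases hI : indT i j M
      · rw [if_pos hI, if_pos hI]
        push_cast
        ring
      · rw [if_neg hI, if_neg hI]
        push_cast
        ring
  rw [List.map_congr_left hcong, PySem.List.sum_map_add_int]
  have hcM : ((RW (M - 1)).countP (fun k => !(decide (k < M)) && indT i M k)) = 0 := by
    apply List.countP_eq_zero.mpr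
    intro k hk
    obtain ⟨hk2, hkM⟩ := mem_RW hk
    simp [show k < M by omega]
  have hfM : (if M < i then (0 : Int)
      else (((RW (M - 1) ++ [M]).countP (fun k => !(decide (k < M)) && indT i M k) : Nat) : Int))
      = (if M < i then (0 : Int) else if indT i M M then 1 else 0) := by
    rw [List.countP_append, hcM]
    have hMM : (!(decide (M < M)) && indT i M M) = indT i M M := by simp
    simp only [List.countP_cons, List.countP_nil, Nat.zero_add, hMM]
    by_cases hMi : M < i
    · rw [if_pos hMi, if_pos hMi]
    · rw [if_neg hMi, if_neg hMi]
      by_cases hI : indT i M M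
      · rw [if_pos hI, if_pos hI]
        norm_num
      · rw [if_neg hI, if_neg hI]
        norm_num
  rw [hfM]

-- split of the k = M slice sums when the weight list grows by one element
lemma L2 (M i : Int) (hM : 2 ≤ M) :
    ((RW M).map (fun j => if j < i then (0 : Int) else if indT i j M then 1 else 0)).sum
    = ((RW (M - 1)).map (fun j => if j < i then (0 : Int) else if indT i j M then 1 else 0)).sum
      + (if M < i then (0 : Int) else if indT i M M then 1 else 0) := by
  rw [RW_succ M hM, List.map_append, List.sum_append]
  simp

lemma cnt3_step (M : Int) (hM : 2 ≤ M) : cnt3 M = cnt3 (M - 1) + newc M := by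
  unfold cnt3
  rw [List.map_congr_left (fun i _ => L1 M i hM)]
  rw [PySem.List.sum_map_add_int, PySem.List.sum_map_add_int]
  have hz0 : ∀ j ∈ RW (M - 1), (if j < M then (0 : Int)
      else (((RW (M - 1)).countP (fun k => !(decide (k < j)) && indT M j k) : Nat) : Int)) = (0 : Int) := by
    intro j hj
    obtain ⟨hj2, hjM⟩ := mem_RW hj
    rw [if_pos (show j < M by omega)]
  have hsplit1 : ((RW M).map (fun i => ((RW (M - 1)).map (fun j => if j < i then (0 : Int)
      else (((RW (M - 1)).countP (fun k => !(decide (k < j)) && indT i j k) : Nat) : Int))).sum)).sum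
      = ((RW (M - 1)).map (fun i => ((RW (M - 1)).map (fun j => if j < i then (0 : Int)
      else (((RW (M - 1)).countP (fun k => !(decide (k < j)) && indT i j k) : Nat) : Int))).sum)).sum := by
    rw [RW_succ M hM, List.map_append, List.sum_append]
    simp only [List.map_cons, List.map_nil, List.sum_cons, List.sum_nil, add_zero]
    rw [List.map_congr_left hz0]
    simp
  rw [hsplit1]
  unfold newc
  rw [List.map_congr_left (fun i _ => L2 M i hM), PySem.List.sum_map_add_int]
  ring

lemma PP_step (M : Int) (hM : 4 ≤ M) :
    PP M = PP (M - 2) + (M - 2) + (if M % 2 = 0 then 1 else 0) := by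
  have h1 : RW M = RW (M - 1) ++ [M] := RW_succ M (by omega)
  have h2 : RW (M - 1) = RW (M - 2) ++ [M - 1] := by
    have h := RW_succ (M - 1) (by omega)
    rwa [show M - 1 - 1 = M - 2 by ring] at h
  have hps : ∀ i ∈ RW (M - 2), pairSum M i = pairSum (M - 2) i + 1 := by
    intro i hi
    obtain ⟨hi2, hiM⟩ := mem_RW hi
    unfold pairSum
    rw [h1, h2, List.map_append, List.map_append, List.sum_append, List.sum_append]
    simp only [List.map_cons, List.map_nil, List.sum_cons, List.sum_nil, add_zero]
    have hc : ∀ j ∈ RW (M - 2),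
        (if j < i then (0 : Int) else if (i + j + M) % 2 = 0 then 1 else 0)
        = (if j < i then (0 : Int) else if (i + j + (M - 2)) % 2 = 0 then 1 else 0) := by
      intro j _
      by_cases hji : j < i
      · simp [hji]
      · rw [if_neg hji, if_neg hji,
          if_congr (show (i + j + M) % 2 = 0 ↔ (i + j + (M - 2)) % 2 = 0 by omega) rfl rfl]
    rw [List.map_congr_left hc]
    rw [if_neg (show ¬(M - 1 < i) by omega), if_neg (show ¬(M < i) by omega)]
    by_cases hp : (i + M + M) % 2 = 0
    · rw [if_pos hp, if_neg (show ¬((i + (M - 1) + M) % 2 = 0) by omega)]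
      ring
    · rw [if_neg hp, if_pos (show (i + (M - 1) + M) % 2 = 0 by omega)]
      ring
  have hpsM1 : pairSum M (M - 1) = 1 := by
    unfold pairSum
    rw [h1, h2, List.map_append, List.map_append, List.sum_append, List.sum_append]
    simp only [List.map_cons, List.map_nil, List.sum_cons, List.sum_nil, add_zero]
    have hz : ∀ j ∈ RW (M - 2), (if j < M - 1 then (0 : Int)
        else if (M - 1 + j + M) % 2 = 0 then 1 else 0) = (0 : Int) := by
      intro j hj
      obtain ⟨hj2, hjM⟩ := mem_RW hj
      rw [if_pos (show j < M - 1 by omega)]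
    rw [List.map_congr_left hz]
    rw [if_neg (lt_irrefl (M - 1)), if_neg (show ¬(M < M - 1) by omega)]
    by_cases hp : (M - 1 + (M - 1) + M) % 2 = 0
    · rw [if_pos hp, if_neg (show ¬((M - 1 + M + M) % 2 = 0) by omega)]
      simp
    · rw [if_neg hp, if_pos (show (M - 1 + M + M) % 2 = 0 by omega)]
      simp
  have hpsM : pairSum M M = (if M % 2 = 0 then (1 : Int) else 0) := by
    unfold pairSum
    rw [h1, h2, List.map_append, List.map_append, List.sum_append, List.sum_append]
    simp only [List.map_cons, List.map_nil, List.sum_cons, List.sum_nil, add_zero]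
    have hz : ∀ j ∈ RW (M - 2), (if j < M then (0 : Int)
        else if (M + j + M) % 2 = 0 then 1 else 0) = (0 : Int) := by
      intro j hj
      obtain ⟨hj2, hjM⟩ := mem_RW hj
      rw [if_pos (show j < M by omega)]
    rw [List.map_congr_left hz]
    rw [if_pos (show M - 1 < M by omega), if_neg (lt_irrefl M)]
    rw [if_congr (show (M + M + M) % 2 = 0 ↔ M % 2 = 0 by omega) rfl rfl]
    simp
  unfold PP
  rw [h1, h2, List.map_append, List.map_append, List.sum_append, List.sum_append]
  simp only [List.map_cons, List.map_nil, List.sum_cons, List.sum_nil, add_zero]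
  rw [List.map_congr_left hps, PySem.List.sum_map_add_int, PySem.List.sum_map_const_int]
  have hlen : ((RW (M - 2)).length : Int) = M - 3 := by
    unfold RW
    rw [PySem.List.length_pyRange_one]
    omega
  rw [hlen, hpsM1, hpsM]
  have hite : (if M % 2 = 0 then (1 : Int) else 0) = 1 ∨ (if M % 2 = 0 then (1 : Int) else 0) = 0 := by
    split <;> simp
  rcases hite with h | h <;> rw [h] <;> ring

lemma newc_eq (M : Int) (hM : 3 ≤ M) : newc M = PP M - 1 := by
  have hcons : RW M = 2 :: PySem.List.pyRange 3 (M + 1) 1 := by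
    unfold RW
    exact PySem.List.pyRange_one_cons (by omega)
  have houter : ∀ f : Int → Int,
      ((RW M).map f).sum = f 2 + ((PySem.List.pyRange 3 (M + 1) 1).map f).sum := by
    intro f
    rw [hcons, List.map_cons, List.sum_cons]
  have htail : ∀ i ∈ PySem.List.pyRange 3 (M + 1) 1,
      ((RW M).map (fun j => if j < i then (0 : Int) else if indT i j M then 1 else 0)).sum
      = pairSum M i := by
    intro i hi
    rw [PySem.List.mem_pyRange_one] at hi
    unfold pairSum
    refine congrArg List.sum (List.map_congr_left ?_)
    intro j _
    by_cases hji : j < i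
    · simp [hji]
    · rw [if_neg hji, if_neg hji, indT_eq M hM i j]
      refine if_congr ?_ rfl rfl
      simp only [Bool.and_eq_true, decide_eq_true_eq, Bool.not_eq_true', decide_eq_false_iff_not]
      constructor
      · exact fun h => h.1
      · exact fun h => ⟨h, fun hc => by omega⟩
  have hhead : ((RW M).map (fun j => if j < 2 then (0 : Int)
      else if indT 2 j M then 1 else 0)).sum = pairSum M 2 - 1 := by
    unfold pairSum
    rw [RW_succ M (by omega), List.map_append, List.map_append, List.sum_append, List.sum_append]
    simp only [List.map_cons, List.map_nil, List.sum_cons, List.sum_nil, add_zero]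
    have hc : ∀ j ∈ RW (M - 1), (if j < 2 then (0 : Int) else if indT 2 j M then 1 else 0)
        = (if j < 2 then (0 : Int) else if (2 + j + M) % 2 = 0 then 1 else 0) := by
      intro j hj
      obtain ⟨hj2, hjM⟩ := mem_RW hj
      rw [if_neg (show ¬(j < 2) by omega), if_neg (show ¬(j < 2) by omega), indT_eq M hM 2 j]
      refine if_congr ?_ rfl rfl
      simp only [Bool.and_eq_true, decide_eq_true_eq, Bool.not_eq_true', decide_eq_false_iff_not]
      constructor
      · exact fun h => h.1
      · exact fun h => ⟨h, fun hc => by omega⟩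
    rw [List.map_congr_left hc]
    rw [if_neg (show ¬(M < 2) by omega), if_neg (show ¬(M < 2) by omega), indT_eq M hM 2 M]
    rw [if_neg (show ¬((decide ((2 + M + M) % 2 = 0) && !(decide ((2 : Int) = 2 ∧ M = M))) = true)
        by simp)]
    rw [if_pos (show (2 + M + M) % 2 = 0 by omega)]
    ring
  unfold newc PP
  rw [houter (fun i => ((RW M).map
      (fun j => if j < i then (0 : Int) else if indT i j M then 1 else 0)).sum),
    houter (fun i => pairSum M i)]
  rw [List.map_congr_left htail, hhead]
  ring

lemma cnt3_nonneg (N : Int) : 0 ≤ cnt3 N := by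
  unfold cnt3
  apply List.sum_nonneg
  intro x hx
  simp only [List.mem_map] at hx
  obtain ⟨i, -, rfl⟩ := hx
  apply List.sum_nonneg
  intro y hy
  simp only [List.mem_map] at hy
  obtain ⟨j, -, rfl⟩ := hy
  split
  · exact le_refl 0
  · exact Int.natCast_nonneg _

-- closed form of the parity-pair count in terms of B's running counters
lemma PP_closed (n : Nat) :
    PP ((n : Int) + 2) = (if ((n : Int) + 2) % 2 = 0 then Te n + To n else Ev n * Od n) ∧
    PP ((n : Int) + 3) = (if ((n : Int) + 3) % 2 = 0 then Te (n + 1) + To (n + 1)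
      else Ev (n + 1) * Od (n + 1)) := by
  induction n with
  | zero => exact ⟨by decide, by decide⟩
  | succ n ih =>
    obtain ⟨ih1, ih2⟩ := ih
    have hcast3 : ((n + 1 : Nat) : Int) + 2 = (n : Int) + 3 := by push_cast; ring
    have hcast4 : ((n + 1 : Nat) : Int) + 3 = (n : Int) + 4 := by push_cast; ring
    refine ⟨by rw [hcast3]; exact ih2, ?_⟩
    rw [hcast4]
    have hstep := PP_step ((n : Int) + 4) (by omega)
    rw [show (n : Int) + 4 - 2 = (n : Int) + 2 by ring] at hstep
    have hEv2 : Ev (n + 2) = Ev n + 1 := by unfold Ev; push_cast; omega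
    have hOd2 : Od (n + 2) = Od n + 1 := by unfold Od; push_cast; omega
    have hEvOd : Ev n + Od n = (n : Int) + 1 := by unfold Ev Od; omega
    have hgoal : PP ((n : Int) + 4)
        = (if ((n : Int) + 4) % 2 = 0 then Te (n + 2) + To (n + 2) else Ev (n + 2) * Od (n + 2)) := by
      rcases Nat.mod_two_eq_zero_or_one n with hn | hn
      · rw [if_pos (show ((n : Int) + 4) % 2 = 0 by omega)]
        rw [if_pos (show ((n : Int) + 2) % 2 = 0 by omega)] at ih1
        rw [if_pos (show ((n : Int) + 4) % 2 = 0 by omega)] at hstep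
        have hTe2 : Te (n + 2) = Te (n + 1) + Ev (n + 2) := by
          show (if ((n : Int) + 1 + 3) % 2 = 0 then Te (n + 1) + Ev (n + 2) else Te (n + 1)) = _
          rw [if_pos (show ((n : Int) + 1 + 3) % 2 = 0 by omega)]
        have hTe1 : Te (n + 1) = Te n := by
          show (if ((n : Int) + 3) % 2 = 0 then Te n + Ev (n + 1) else Te n) = _
          rw [if_neg (show ¬(((n : Int) + 3) % 2 = 0) by omega)]
        have hTo2 : To (n + 2) = To (n + 1) := by
          show (if ((n : Int) + 1 + 3) % 2 = 0 then To (n + 1) else To (n + 1) + Od (n + 2)) = _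
          rw [if_pos (show ((n : Int) + 1 + 3) % 2 = 0 by omega)]
        have hTo1 : To (n + 1) = To n + Od (n + 1) := by
          show (if ((n : Int) + 3) % 2 = 0 then To n else To n + Od (n + 1)) = _
          rw [if_neg (show ¬(((n : Int) + 3) % 2 = 0) by omega)]
        rw [hstep, ih1, hTe2, hTe1, hTo2, hTo1]
        have hEvn2 : Ev (n + 2) = ((n : Int) + 4) / 2 := by
          unfold Ev; push_cast; omega
        have hOdn1 : Od (n + 1) = ((n : Int) + 2) / 2 := by
          unfold Od; push_cast; omega
        rw [hEvn2, hOdn1]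
        omega
      · rw [if_neg (show ¬(((n : Int) + 4) % 2 = 0) by omega)]
        rw [if_neg (show ¬(((n : Int) + 2) % 2 = 0) by omega)] at ih1
        rw [if_neg (show ¬(((n : Int) + 4) % 2 = 0) by omega)] at hstep
        rw [hstep, ih1, hEv2, hOd2]
        have hx : (Ev n + 1) * (Od n + 1) = Ev n * Od n + (Ev n + Od n) + 1 := by ring
        rw [hx, hEvOd]
        ring
    rw [show Te (n + 1 + 1) = Te (n + 2) from rfl, show To (n + 1 + 1) = To (n + 2) from rfl,
      show Ev (n + 1 + 1) = Ev (n + 2) from rfl, show Od (n + 1 + 1) = Od (n + 2) from rfl]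
    exact hgoal

-- B's counters are exactly (Ev, Od, Te, To, cnt3, 2^cnt3, factorial)
lemma spec_eq (n : Nat) : specState n
    = (Ev n, Od n, Te n, To n, cnt3 ((n : Int) + 2),
       (2 : Int) ^ (cnt3 ((n : Int) + 2)).toNat, ((n + 2).factorial : Int)) := by
  induction n with
  | zero =>
    show ((1 : Int), (0 : Int), (1 : Int), (0 : Int), (0 : Int), (1 : Int), (2 : Int)) = _
    decide
  | succ n ih =>
    show galois_upd ((n : Int) + 2) (specState n) = _
    rw [ih]
    have hcast : ((n + 1 : Nat) : Int) + 2 = (n : Int) + 3 := by push_cast; ring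
    rw [hcast]
    have hPP := (PP_closed n).2
    have hnc : newc ((n : Int) + 3) = PP ((n : Int) + 3) - 1 := newc_eq _ (by omega)
    have hcs : cnt3 ((n : Int) + 3) = cnt3 ((n : Int) + 2) + newc ((n : Int) + 3) := by
      have h := cnt3_step ((n : Int) + 3) (by omega)
      rwa [show (n : Int) + 3 - 1 = (n : Int) + 2 by ring] at h
    have hnn : 0 ≤ cnt3 ((n : Int) + 2) := cnt3_nonneg _
    have hTe : 1 ≤ Te n := Te_pos n
    have hTo : 0 ≤ To n := To_nonneg n
    have hEv : 1 ≤ Ev n := by unfold Ev; omega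
    have hOd : 0 ≤ Od n := by unfold Od; omega
    rcases Nat.mod_two_eq_zero_or_one n with hn | hn
    · -- n even : M = n + 3 odd, else branch of galois_upd
      have hmod : PySem.Int.mod ((n : Int) + 2 + 1) 2 = 1 := by
        rw [PySem.Int.mod_eq_emod_of_pos (by norm_num)]; omega
      have hg : Ev n * (Od n + 1) - 1 = newc ((n : Int) + 3) := by
        rw [hnc, hPP, if_neg (show ¬(((n : Int) + 3) % 2 = 0) by omega)]
        have h1 : Ev (n + 1) = Ev n := by unfold Ev; push_cast; omega
        have h2 : Od (n + 1) = Od n + 1 := by unfold Od; push_cast; omega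
        rw [h1, h2]
      have hgpos : 0 ≤ Ev n * (Od n + 1) - 1 := by
        have h := mul_le_mul hEv (show (1 : Int) ≤ Od n + 1 by omega) (by norm_num) (by omega)
        linarith
      simp only [galois_upd, hmod]
      rw [if_neg (by decide)]
      simp only [Prod.mk.injEq]
      refine ⟨?_, ?_, ?_, ?_, ?_, ?_, ?_⟩
      · unfold Ev; push_cast; omega
      · unfold Od; push_cast; omega
      · show Te n = Te (n + 1)
        show Te n = (if ((n : Int) + 3) % 2 = 0 then Te n + Ev (n + 1) else Te n)
        rw [if_neg (show ¬(((n : Int) + 3) % 2 = 0) by omega)]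
      · show To n + (Od n + 1) = To (n + 1)
        show To n + (Od n + 1) = (if ((n : Int) + 3) % 2 = 0 then To n else To n + Od (n + 1))
        rw [if_neg (show ¬(((n : Int) + 3) % 2 = 0) by omega)]
        have h2 : Od (n + 1) = Od n + 1 := by unfold Od; push_cast; omega
        rw [h2]
      · rw [hcs, ← hg]
      · rw [Int.shiftLeft_eq, ← pow_add]
        congr 1
        rw [hcs, ← hg]
        generalize hEO : Ev n * (Od n + 1) = t at hgpos ⊢
        omega
      · rw [show (n + 1 + 2).factorial = (n + 2 + 1) * (n + 2).factorial from Nat.factorial_succ (n + 2)]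
        push_cast
        ring
    · -- n odd : M = n + 3 even, then branch of galois_upd
      have hmod : PySem.Int.mod ((n : Int) + 2 + 1) 2 = 0 := by
        rw [PySem.Int.mod_eq_emod_of_pos (by norm_num)]; omega
      have hg : Te n + (Ev n + 1) + To n - 1 = newc ((n : Int) + 3) := by
        rw [hnc, hPP, if_pos (show ((n : Int) + 3) % 2 = 0 by omega)]
        have h1 : Ev (n + 1) = Ev n + 1 := by unfold Ev; push_cast; omega
        have hTe1 : Te (n + 1) = Te n + Ev (n + 1) := by
          show (if ((n : Int) + 3) % 2 = 0 then Te n + Ev (n + 1) else Te n) = _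
          rw [if_pos (show ((n : Int) + 3) % 2 = 0 by omega)]
        have hTo1 : To (n + 1) = To n := by
          show (if ((n : Int) + 3) % 2 = 0 then To n else To n + Od (n + 1)) = _
          rw [if_pos (show ((n : Int) + 3) % 2 = 0 by omega)]
        rw [hTe1, hTo1, h1]
      have hgpos : 0 ≤ Te n + (Ev n + 1) + To n - 1 := by omega
      simp only [galois_upd, hmod]
      rw [if_pos (by decide)]
      simp only [Prod.mk.injEq]
      refine ⟨?_, ?_, ?_, ?_, ?_, ?_, ?_⟩
      · unfold Ev; push_cast; omega
      · unfold Od; push_cast; omega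
      · show Te n + (Ev n + 1) = Te (n + 1)
        show Te n + (Ev n + 1) = (if ((n : Int) + 3) % 2 = 0 then Te n + Ev (n + 1) else Te n)
        rw [if_pos (show ((n : Int) + 3) % 2 = 0 by omega)]
        have h1 : Ev (n + 1) = Ev n + 1 := by unfold Ev; push_cast; omega
        rw [h1]
      · show To n = To (n + 1)
        show To n = (if ((n : Int) + 3) % 2 = 0 then To n else To n + Od (n + 1))
        rw [if_pos (show ((n : Int) + 3) % 2 = 0 by omega)]
      · rw [hcs, ← hg]
      · rw [Int.shiftLeft_eq, ← pow_add]
        congr 1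
        rw [hcs, ← hg]
        omega
      · rw [show (n + 1 + 2).factorial = (n + 2 + 1) * (n + 2).factorial from Nat.factorial_succ (n + 2)]
        push_cast
        ring

lemma fold_eq (n : Nat) :
    (PySem.List.pyRange 2 ((n : Int) + 2) 1).foldl galois_step ([], 1, 0, 1, 0, 0, 1, 2) =
      ((PySem.List.pyRange 2 ((n : Int) + 2) 1).foldl (fun result N =>
        let r := count_higher_spin_couplings N
        result ++ [[("N", N), ("n_hs_couplings", r), ("galois_upper_bound", (2 : Int) ^ r.toNat),
                    ("weyl_order", (N.toNat.factorial : Int)),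
                    ("spectral_genus", spectral_curve_genus N)]]) [], specState n) := by
  induction n with
  | zero =>
    have h : PySem.List.pyRange 2 (((0 : Nat) : Int) + 2) 1 = [] :=
      PySem.List.pyRange_one_eq_nil (by norm_num)
    rw [h]
    rfl
  | succ n ih =>
    have hsplit : PySem.List.pyRange 2 (((n + 1 : Nat) : Int) + 2) 1
        = PySem.List.pyRange 2 ((n : Int) + 2) 1 ++ [(n : Int) + 2] := by
      rw [show (((n + 1 : Nat) : Int) + 2) = ((n : Int) + 2) + 1 by push_cast; ring]
      exact PySem.List.pyRange_one_succ_right (by omega)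
    rw [hsplit, List.foldl_append, List.foldl_append, ih]
    simp only [List.foldl_cons, List.foldl_nil]
    rw [spec_eq n]
    simp only [galois_step]
    have htn : (((n : Int) + 2)).toNat = n + 2 := by omega
    simp only [Prod.mk.injEq]
    constructor
    · simp only [count_eq_cnt3, htn, spectral_curve_genus]
    · show galois_upd ((n : Int) + 2) _ = specState (n + 1)
      rw [show specState (n + 1) = galois_upd ((n : Int) + 2) (specState n) from rfl, spec_eq n]

-- ===== VERDICT (by name: the statement is the Claim_ definition above) =====
theorem galois_complexity_growth_spec : Claim_equal_galois_complexity_growth := by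
  intro N_max _
  unfold Spec_galois_complexity_growth
  by_cases h : N_max ≤ 1
  · have hnil : PySem.List.pyRange 2 (N_max + 1) 1 = [] :=
      PySem.List.pyRange_one_eq_nil (by omega)
    unfold galois_complexity_growth galois_complexity_growth_alt
    rw [hnil]
    rfl
  · set n : Nat := (N_max - 1).toNat with hn
    have h2 : (n : Int) + 2 = N_max + 1 := by omega
    unfold galois_complexity_growth galois_complexity_growth_alt
    rw [← h2, fold_eq n]
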